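-- pv_equiv track=rewrite | github.com/Catherine9811/HCI-SENSE-42 | analyze_behavioural/check_mouse_clicking_duration.py | mouse_pressed_frames
-- ===== SOURCE A (Python) =====
-- def mouse_pressed_frames(mouse_pressed, ignore_beginning=True):
--     """
--         Counts the number of frames where the mouse is pressed (value == 1),
--         optionally ignoring leading 1s at the beginning of the array.
--
--         Args:
--             mouse_pressed (list or array-like): List of 0s and 1s indicating mouse press state.
--             ignore_beginning (bool): Whether to ignore leading 1s at the start.
--
--         Returns:
--             int: Number of frames with mouse pressed, considering the ignore_beginning flag.
--         """
--     if ignore_beginning: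
--         # Skip leading 1s
--         i = 0
--         while i < len(mouse_pressed) and mouse_pressed[i] == 1:
--             i += 1
--         return sum(mouse_pressed[i:])
--     else:
--         return sum(mouse_pressed)
-- ===== SOURCE B (Python) =====
-- def mouse_pressed_frames(mouse_pressed, ignore_beginning=True):
--     skipping = bool(ignore_beginning)
--     acc = 0
--     for x in mouse_pressed:
--         if skipping and x == 1:
--             continue
--         skipping = False
--         acc += x
--     return acc
-- ===== Notes on version B (the rewrite author's own statement) =====
-- stated objective: alternative
-- what changed: B is a single-pass state machine: one loop over the elements carrying a skipping flag and an accumulator, instead of A's two staged passes (a while-loop to find the end of the leading 1-run, then summing the suffix).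
import Mathlib
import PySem

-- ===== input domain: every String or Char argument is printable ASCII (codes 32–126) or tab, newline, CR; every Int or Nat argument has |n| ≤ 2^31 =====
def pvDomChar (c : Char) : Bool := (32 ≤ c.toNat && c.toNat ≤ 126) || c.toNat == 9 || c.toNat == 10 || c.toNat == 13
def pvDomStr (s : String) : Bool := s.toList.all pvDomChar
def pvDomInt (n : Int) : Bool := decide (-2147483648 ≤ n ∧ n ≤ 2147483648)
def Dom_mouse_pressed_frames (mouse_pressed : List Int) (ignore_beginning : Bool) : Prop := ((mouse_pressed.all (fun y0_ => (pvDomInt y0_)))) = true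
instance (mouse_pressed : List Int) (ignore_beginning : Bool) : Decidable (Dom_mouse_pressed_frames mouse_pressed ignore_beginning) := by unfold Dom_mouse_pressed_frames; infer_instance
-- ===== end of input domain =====

-- B replaces A's two staged passes (a while-loop locating the end of the leading
-- 1-run, then summing the suffix) by one single-pass state machine carrying a
-- skipping flag and an accumulator.


-- ===== PORT A =====
-- A's while-loop skipping leading 1s, then sum of the remaining suffix
def pvSkipSum : List Int → Int
  | [] => 0
  | x :: xs => if x = 1 then pvSkipSum xs else (x :: xs).sum

def mouse_pressed_frames (mouse_pressed : List Int) (ignore_beginning : Bool) : Int :=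
  if ignore_beginning then pvSkipSum mouse_pressed else mouse_pressed.sum

-- ===== PORT B =====
-- B's single for-loop body: state (skipping flag, accumulator)
def pvStep (s : Bool × Int) (x : Int) : Bool × Int :=
  if s.1 ∧ x = 1 then s else (false, s.2 + x)

def mouse_pressed_frames_alt (mouse_pressed : List Int) (ignore_beginning : Bool) : Int :=
  (mouse_pressed.foldl pvStep (ignore_beginning, 0)).2

-- ===== PRECONDITION & SPEC =====
def Spec_mouse_pressed_frames (mouse_pressed : List Int) (ignore_beginning : Bool) (out : Int) : Prop := out = mouse_pressed_frames_alt mouse_pressed ignore_beginning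
instance (mouse_pressed : List Int) (ignore_beginning : Bool) (out : Int) : Decidable (Spec_mouse_pressed_frames mouse_pressed ignore_beginning out) := by unfold Spec_mouse_pressed_frames; infer_instance

-- ===== CLAIM (what is proved, stated in full; the proofs are below) =====
def Claim_equal_mouse_pressed_frames : Prop := ∀ (mouse_pressed : List Int) (ignore_beginning : Bool), Dom_mouse_pressed_frames mouse_pressed ignore_beginning → Spec_mouse_pressed_frames mouse_pressed ignore_beginning (mouse_pressed_frames mouse_pressed ignore_beginning)

-- ===== LEMMAS AND PROOFS =====
theorem pvFold_false (l : List Int) (acc : Int) :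
    (l.foldl pvStep (false, acc)).2 = acc + l.sum := by
  induction l generalizing acc with
  | nil => simp
  | cons x xs ih => simp [pvStep, ih]; ring

theorem pvFold_true (l : List Int) (acc : Int) :
    (l.foldl pvStep (true, acc)).2 = acc + pvSkipSum l := by
  induction l generalizing acc with
  | nil => simp [pvSkipSum]
  | cons x xs ih =>
    by_cases h : x = 1
    · simp [pvStep, h, ih, pvSkipSum]
    · simp [pvStep, h, pvSkipSum, pvFold_false]; ring

-- ===== VERDICT (by name: the statement is the Claim_ definition above) =====
theorem mouse_pressed_frames_spec : Claim_equal_mouse_pressed_frames := by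
  intro l fl _
  unfold Spec_mouse_pressed_frames mouse_pressed_frames mouse_pressed_frames_alt
  cases fl <;> simp [pvFold_false, pvFold_true]
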